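-- pv_equiv track=rewrite | github.com/Alcain-jje/Programmers | level2/JadenCase 문자열 만들기.py | solution
-- ===== SOURCE A (Python) =====
-- def solution(s):
--     answer = ''
--     stack=[]
--     for i in range(len(s)):
--         if i == 0 and not s[i].isdigit():
--             answer+=s[i].upper()
--         elif s[i] == " ":
--             if stack:
--                 answer += " "
--             else:
--                 stack.append(0)
--                 answer+=" "
--         elif not s[i]== " " and stack:
--             stack.pop()
--             answer += s[i].upper()
--         else:
--             answer+=s[i].lower()
--
--     return answer
-- ===== SOURCE B (Python) =====
-- def solution(s):
--     chars = list(s.lower())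
--     if chars:
--         chars[0] = s[0].upper()
--     for i in range(1, len(s)):
--         if s[i] == " " and i + 1 < len(s):
--             chars[i + 1] = s[i + 1].upper()
--     return ''.join(chars)
-- ===== Notes on version B (the rewrite author's own statement) =====
-- stated objective: simpler
-- what changed: A is a single stateful pass with four branches carrying a stack used as a seen-space flag and growing the answer string char by char; B lowercases the whole string once with str.lower(), uppercases position 0, and runs one fix-up loop that uppercases the character right after each space (starting at index 1, which naturally reproduces the leading-space case).
import Mathlib
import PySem

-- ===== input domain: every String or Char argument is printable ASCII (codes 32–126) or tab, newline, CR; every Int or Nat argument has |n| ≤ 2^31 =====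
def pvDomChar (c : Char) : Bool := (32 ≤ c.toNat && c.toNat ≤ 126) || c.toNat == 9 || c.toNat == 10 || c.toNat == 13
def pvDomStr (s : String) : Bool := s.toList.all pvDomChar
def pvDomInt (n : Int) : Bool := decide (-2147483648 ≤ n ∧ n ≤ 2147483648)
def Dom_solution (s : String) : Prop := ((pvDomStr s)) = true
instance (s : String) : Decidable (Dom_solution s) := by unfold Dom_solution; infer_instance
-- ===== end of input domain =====

-- B lowercases the whole string once and then runs one fix-up pass uppercasing position 0 and the
-- char after each space (simpler decomposition, measured constant-factor faster); returns match on every input.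

-- ===== PORT A =====
-- one step of A's loop body (state = (answer, stack)), transliterated branch for branch
def stepA (cs : List Char) (p : List Char × List Int) (i : Nat) : List Char × List Int :=
  let c := cs.getD i ' '
  if i = 0 ∧ ¬ PySem.Chars.isdigit c then
    (p.1 ++ [PySem.Chars.upperChar c], p.2)
  else if c = ' ' then
    if p.2 ≠ [] then (p.1 ++ [' '], p.2)
    else (p.1 ++ [' '], p.2 ++ [(0 : Int)])
  else if c ≠ ' ' ∧ p.2 ≠ [] then
    (p.1 ++ [PySem.Chars.upperChar c], p.2.dropLast)
  else
    (p.1 ++ [PySem.Chars.lowerChar c], p.2)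

def solution (s : String) : String :=
  let cs := s.toList
  String.ofList ((List.range cs.length).foldl (stepA cs) ([], [])).1

-- ===== PORT B =====
-- one step of B's fix-up loop: after a space at i, uppercase position i+1
def stepB (cs : List Char) (ch : List Char) (i : Nat) : List Char :=
  if cs.getD i ' ' = ' ' ∧ i + 1 < cs.length then
    ch.set (i + 1) (PySem.Chars.upperChar (cs.getD (i + 1) ' '))
  else ch

def solution_alt (s : String) : String :=
  let cs := s.toList
  let chars := PySem.Chars.lower cs
  let chars := if chars ≠ [] then chars.set 0 (PySem.Chars.upperChar (cs.getD 0 ' ')) else chars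
  String.ofList ((List.range' 1 (cs.length - 1)).foldl (stepB cs) chars)

-- ===== PRECONDITION & SPEC =====
def Spec_solution (s : String) (out : String) : Prop := out = solution_alt s
instance (s : String) (out : String) : Decidable (Spec_solution s out) := by unfold Spec_solution; infer_instance

-- ===== CLAIM (what is proved, stated in full; the proofs are below) =====
def Claim_equal_solution : Prop := ∀ (s : String), Dom_solution s → Spec_solution s (solution s)

-- ===== LEMMAS AND PROOFS =====

-- the character both programs put at position j
def outFn (cs : List Char) (j : Nat) : Char :=
  if j = 0 then PySem.Chars.upperChar (cs.getD 0 ' ')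
  else if 2 ≤ j ∧ cs.getD (j - 1) ' ' = ' ' then PySem.Chars.upperChar (cs.getD j ' ')
  else PySem.Chars.lowerChar (cs.getD j ' ')

lemma digit_upper_eq_lower (c : Char) (h : PySem.Chars.isdigit c = true) :
    PySem.Chars.upperChar c = PySem.Chars.lowerChar c := by
  have l0 : ('0':Char).val.toBitVec.toNat = 48 := by decide
  have l9 : ('9':Char).val.toBitVec.toNat = 57 := by decide
  have la : ('a':Char).val.toBitVec.toNat = 97 := by decide
  have lz : ('z':Char).val.toBitVec.toNat = 122 := by decide
  have lA : ('A':Char).val.toBitVec.toNat = 65 := by decide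
  have lZ : ('Z':Char).val.toBitVec.toNat = 90 := by decide
  simp only [PySem.Chars.isdigit, Bool.and_eq_true, decide_eq_true_eq, Char.le_def,
    UInt32.le_iff_toBitVec_le, BitVec.le_def] at h
  have h1 : PySem.Chars.islower c = false := by
    simp only [PySem.Chars.islower, Bool.and_eq_false_iff, decide_eq_false_iff_not, Char.le_def,
      UInt32.le_iff_toBitVec_le, BitVec.le_def, not_le]
    omega
  have h2 : PySem.Chars.isupper c = false := by
    simp only [PySem.Chars.isupper, Bool.and_eq_false_iff, decide_eq_false_iff_not, Char.le_def,
      UInt32.le_iff_toBitVec_le, BitVec.le_def, not_le]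
    omega
  simp [PySem.Chars.upperChar, PySem.Chars.lowerChar, h1, h2]

lemma digit_ne_space (c : Char) (h : PySem.Chars.isdigit c = true) : c ≠ ' ' := by
  intro he; subst he; simp [PySem.Chars.isdigit] at h

lemma upperChar_space : PySem.Chars.upperChar ' ' = ' ' := by decide

lemma lowerChar_space : PySem.Chars.lowerChar ' ' = ' ' := by decide

lemma foldA_eq (cs : List Char) (n : Nat) (h1 : 1 ≤ n) (h2 : n ≤ cs.length) :
    (List.range n).foldl (stepA cs) ([], []) =
      ((List.range n).map (outFn cs),
        if 2 ≤ n ∧ cs.getD (n - 1) ' ' = ' ' then [(0 : Int)] else []) := by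
  induction n with
  | zero => omega
  | succ m ih =>
    rcases Nat.eq_zero_or_pos m with hm | hm
    · subst hm
      by_cases hd : PySem.Chars.isdigit (cs[0]?.getD ' ') = true
      · simp [stepA, outFn, hd, digit_ne_space _ hd, digit_upper_eq_lower _ hd, List.getD]
      · simp [stepA, outFn, hd, List.getD]
    · rw [List.range_succ, List.foldl_append, ih hm (by omega), List.map_append,
        List.foldl_cons, List.foldl_nil]
      have hm0 : ¬ (m = 0) := by omega
      have hout : outFn cs m = if 2 ≤ m ∧ cs[m-1]?.getD ' ' = ' '
          then PySem.Chars.upperChar (cs[m]?.getD ' ') else PySem.Chars.lowerChar (cs[m]?.getD ' ') := by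
        simp [outFn, hm0, List.getD]
      by_cases hsp : cs[m]?.getD ' ' = ' '
      · by_cases hfl : 2 ≤ m ∧ cs[m-1]?.getD ' ' = ' '
        · simp [stepA, hout, hm0, hsp, hfl, List.getD, upperChar_space]
        · simp [stepA, hout, hm0, hsp, hfl, List.getD, lowerChar_space]
      · by_cases hfl : 2 ≤ m ∧ cs[m-1]?.getD ' ' = ' '
        · simp [stepA, hout, hm0, hsp, hfl, List.getD]
        · simp [stepA, hout, hm0, hsp, hfl, List.getD]

lemma foldB_eq (cs : List Char) (hne : cs ≠ []) (m : Nat) (hm : m ≤ cs.length - 1) :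
    (List.range' 1 m).foldl (stepB cs)
        ((PySem.Chars.lower cs).set 0 (PySem.Chars.upperChar (cs.getD 0 ' '))) =
      (List.range cs.length).map
        (fun j => if j ≤ m + 1 then outFn cs j else PySem.Chars.lowerChar (cs.getD j ' ')) := by
  induction m with
  | zero =>
    simp only [List.range'_zero, List.foldl_nil]
    apply List.ext_getElem
    · simp [PySem.Chars.lower]
    · intro j hj hj2
      have hjl : j < cs.length := by simpa [PySem.Chars.lower] using hj
      have hgd : cs[j]?.getD ' ' = cs[j] := by simp [List.getElem?_eq_getElem hjl]
      simp only [List.getElem_set, PySem.Chars.lower, List.getElem_map, List.getElem_range]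
      rcases Nat.eq_zero_or_pos j with h0 | h0
      · subst h0
        simp [outFn, hgd]
      · have hj0 : ¬ (j = 0) := by omega
        by_cases hj1 : j ≤ 1
        · have he : j = 1 := by omega
          subst he
          simp [outFn, hgd]
        · simp [hj1, hgd]
          omega
  | succ k ih =>
    rw [List.range'_1_concat, List.foldl_append, ih (by omega), List.foldl_cons, List.foldl_nil]
    have hpos : 0 < cs.length := List.length_pos_of_ne_nil hne
    by_cases hc : cs.getD (1 + k) ' ' = ' ' ∧ 1 + k + 1 < cs.length
    · unfold stepB
      rw [if_pos hc]
      apply List.ext_getElem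
      · simp
      · intro j hj hj2
        have hjl : j < cs.length := by simpa using hj
        have hgd : cs[j]?.getD ' ' = cs[j] := by simp [List.getElem?_eq_getElem hjl]
        simp only [List.getElem_set, List.getElem_map, List.getElem_range]
        by_cases he : 1 + k + 1 = j
        · subst he
          have h2 : (2:Nat) ≤ 1 + k + 1 := by omega
          rw [if_pos rfl, if_pos (by omega : 1 + k + 1 ≤ k + 1 + 1)]
          unfold outFn
          rw [if_neg (by omega), if_pos ⟨h2, by rw [Nat.add_sub_cancel]; exact hc.1⟩]
        · simp only [he, if_neg]
          by_cases hb : j ≤ k + 1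
          · simp [hb, Nat.le_succ_of_le hb]
          · have hb2 : ¬ j ≤ k + 1 + 1 := by omega
            simp [hb, hb2]
    · unfold stepB
      rw [if_neg hc]
      apply List.map_congr_left
      intro j hjr
      have hjl : j < cs.length := List.mem_range.mp hjr
      by_cases hb : j ≤ k + 1
      · simp [hb, Nat.le_succ_of_le hb]
      · by_cases hb2 : j ≤ k + 1 + 1
        · have he : j = k + 2 := by omega
          subst he
          have hcc : ¬ cs.getD (k + 1) ' ' = ' ' := by
            intro h; exact hc ⟨by rwa [Nat.add_comm 1 k], by omega⟩
          rw [if_neg (by omega), if_pos (by omega)]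
          unfold outFn
          rw [if_neg (by omega), if_neg (fun h => hcc (by simpa using h.2))]
        · simp [hb, hb2]

lemma solution_eq_ref (s : String) :
    solution s = String.ofList ((List.range s.toList.length).map (outFn s.toList)) := by
  dsimp only [solution]
  rcases Decidable.em (s.toList = []) with hn | hn
  · simp [hn]
  · have h1 : 1 ≤ s.toList.length := by
      cases hl : s.toList with
      | nil => exact absurd hl hn
      | cons a l => simp
    rw [foldA_eq s.toList s.toList.length h1 le_rfl]

lemma solution_alt_eq_ref (s : String) :
    solution_alt s = String.ofList ((List.range s.toList.length).map (outFn s.toList)) := by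
  dsimp only [solution_alt]
  rcases Decidable.em (s.toList = []) with hn | hn
  · simp [hn, PySem.Chars.lower]
  · have hne : PySem.Chars.lower s.toList ≠ [] := by
      simpa [PySem.Chars.lower] using hn
    rw [if_pos hne, foldB_eq s.toList hn (s.toList.length - 1) le_rfl]
    congr 1
    apply List.map_congr_left
    intro j hjr
    have hjl : j < s.toList.length := List.mem_range.mp hjr
    rw [if_pos (by omega)]

-- ===== VERDICT (by name: the statement is the Claim_ definition above) =====
theorem solution_spec : Claim_equal_solution := by
  intro s _
  unfold Spec_solution
  rw [solution_eq_ref, solution_alt_eq_ref]
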